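-- pv_equiv track=rewrite | github.com/Nesiak/basic-algorithms-in-python | PlotCipher.py | plot_cipher
-- ===== SOURCE A (Python) =====
-- def plot_cipher(text):
--     result = ''
--     n = len(text)
--
--     for i in range(0, n, 4):
--         result += text[i]
--     for i in range(1, n, 2):
--         result += text[i]
--     for i in range (2, n, 4):
--         result += text[i]
--
--     return result
-- ===== SOURCE B (Python) =====
-- def plot_cipher(text):
--     b0, b1, b2 = [], [], []
--     for i in range(len(text)):
--         ch = text[i]
--         if i % 4 == 0:
--             b0.append(ch)
--         elif i % 2 == 1:
--             b1.append(ch)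
--         else:
--             b2.append(ch)
--     return ''.join(b0 + b1 + b2)
-- ===== Notes on version B (the rewrite author's own statement) =====
-- stated objective: alternative
-- what changed: Replaces A's three separate strided scans (steps 4, 2, 4) and repeated string concatenation with a single pass over all indices that classifies each character into one of three buckets by i%4/i%2, joined once at the end.
import Mathlib
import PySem

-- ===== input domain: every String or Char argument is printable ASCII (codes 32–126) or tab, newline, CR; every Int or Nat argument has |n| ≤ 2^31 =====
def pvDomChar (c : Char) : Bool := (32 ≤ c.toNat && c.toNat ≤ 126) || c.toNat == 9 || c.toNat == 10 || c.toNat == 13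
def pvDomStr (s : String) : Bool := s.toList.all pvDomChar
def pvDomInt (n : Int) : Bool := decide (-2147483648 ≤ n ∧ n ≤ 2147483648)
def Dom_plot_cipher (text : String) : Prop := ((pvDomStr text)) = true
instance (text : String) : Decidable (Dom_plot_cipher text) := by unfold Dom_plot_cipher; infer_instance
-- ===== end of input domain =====

-- B replaces A's three strided scans with a single classifying pass into three buckets; alternative decomposition, same cost.

-- ===== PORT A =====
def plot_cipher (text : String) : String :=
  let cs := text.toList
  let n := PySem.List.len cs
  let result : List Char := []
  let result := (PySem.List.pyRange 0 n 4).foldl (fun acc i => acc ++ [PySem.List.pyGetD cs i ' ']) result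
  let result := (PySem.List.pyRange 1 n 2).foldl (fun acc i => acc ++ [PySem.List.pyGetD cs i ' ']) result
  let result := (PySem.List.pyRange 2 n 4).foldl (fun acc i => acc ++ [PySem.List.pyGetD cs i ' ']) result
  String.ofList result

-- ===== PORT B =====
def plot_cipher_alt (text : String) : String :=
  let cs := text.toList
  let b := (PySem.List.pyRange 0 (PySem.List.len cs) 1).foldl
    (fun (b : List Char × List Char × List Char) (i : Int) =>
      let ch := PySem.List.pyGetD cs i ' '
      if PySem.Int.mod i 4 == 0 then (b.1 ++ [ch], b.2.1, b.2.2)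
      else if PySem.Int.mod i 2 == 1 then (b.1, b.2.1 ++ [ch], b.2.2)
      else (b.1, b.2.1, b.2.2 ++ [ch]))
    ([], [], [])
  String.ofList (b.1 ++ b.2.1 ++ b.2.2)

-- ===== PRECONDITION & SPEC =====
def Spec_plot_cipher (text : String) (out : String) : Prop := out = plot_cipher_alt text
instance (text : String) (out : String) : Decidable (Spec_plot_cipher text out) := by unfold Spec_plot_cipher; infer_instance

-- ===== CLAIM (what is proved, stated in full; the proofs are below) =====
def Claim_equal_plot_cipher : Prop := ∀ (text : String), Dom_plot_cipher text → Spec_plot_cipher text (plot_cipher text)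

-- ===== LEMMAS AND PROOFS =====

-- B's classifying fold splits into the three buckets, each a filtered map.
theorem bfold (cs : List Char) (L : List Int) (b0 b1 b2 : List Char) :
    L.foldl
      (fun (b : List Char × List Char × List Char) (i : Int) =>
        let ch := PySem.List.pyGetD cs i ' '
        if PySem.Int.mod i 4 == 0 then (b.1 ++ [ch], b.2.1, b.2.2)
        else if PySem.Int.mod i 2 == 1 then (b.1, b.2.1 ++ [ch], b.2.2)
        else (b.1, b.2.1, b.2.2 ++ [ch]))
      (b0, b1, b2)
    = (b0 ++ (L.filter (fun i => PySem.Int.mod i 4 == 0)).map (fun i => PySem.List.pyGetD cs i ' '),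
       b1 ++ (L.filter (fun i => !(PySem.Int.mod i 4 == 0) && (PySem.Int.mod i 2 == 1))).map (fun i => PySem.List.pyGetD cs i ' '),
       b2 ++ (L.filter (fun i => !(PySem.Int.mod i 4 == 0) && !(PySem.Int.mod i 2 == 1))).map (fun i => PySem.List.pyGetD cs i ' ')) := by
  induction L generalizing b0 b1 b2 with
  | nil => simp only [List.foldl_nil, List.filter_nil, List.map_nil, List.append_nil]
  | cons x xs ih =>
    simp only [List.foldl_cons, List.filter_cons]
    by_cases h4 : (PySem.Int.mod x 4 == 0) = true
    · simp only [h4, Bool.not_true, Bool.false_and, if_true, if_false, ite_true, ite_false]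
      rw [ih]
      simp
    · by_cases h2 : (PySem.Int.mod x 2 == 1) = true
      · simp only [h4, h2, Bool.not_false, Bool.true_and, Bool.false_eq_true, if_true, if_false,
          ite_true, ite_false]
        rw [ih]
        simp
      · simp only [h4, h2, Bool.not_false, Bool.true_and, Bool.false_eq_true, if_true, if_false,
          ite_true, ite_false]
        rw [ih]
        simp

-- stride-range successor lemmas (step 4 from 0, step 2 from 1, step 4 from 2)
theorem r04_succ (m : Nat) :
    PySem.List.pyRange 0 ((m : Int) + 1) 4
      = PySem.List.pyRange 0 (m : Int) 4 ++ (if m % 4 = 0 then [(m : Int)] else []) := by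
  rw [PySem.List.pyRange_of_pos _ _ (by norm_num), PySem.List.pyRange_of_pos _ _ (by norm_num)]
  rcases Nat.eq_zero_or_pos m with hm | hm
  · subst hm; simp [List.range_succ]
  by_cases h : m % 4 = 0
  · have hc : (((m : Int) + 1 - 0 + 4 - 1) / 4).toNat = (((m : Int) - 0 + 4 - 1) / 4).toNat + 1 := by omega
    have hv : (((m : Int) - 0 + 4 - 1) / 4).toNat = m / 4 := by omega
    simp only [if_pos (by omega : (0:Int) < (m:Int) + 1), if_pos (by omega : (0:Int) < (m:Int)),
      hc, hv, List.range_succ, List.map_append, if_pos h]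
    simp; omega
  · have hc : (((m : Int) + 1 - 0 + 4 - 1) / 4).toNat = (((m : Int) - 0 + 4 - 1) / 4).toNat := by omega
    simp only [if_pos (by omega : (0:Int) < (m:Int) + 1), if_pos (by omega : (0:Int) < (m:Int)),
      hc, if_neg h, List.append_nil]

theorem r12_succ (m : Nat) :
    PySem.List.pyRange 1 ((m : Int) + 1) 2
      = PySem.List.pyRange 1 (m : Int) 2 ++ (if m % 2 = 1 then [(m : Int)] else []) := by
  rw [PySem.List.pyRange_of_pos _ _ (by norm_num), PySem.List.pyRange_of_pos _ _ (by norm_num)]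
  by_cases hm : m ≤ 1
  · interval_cases m <;> simp [List.range_succ]
  by_cases h : m % 2 = 1
  · have hc : (((m : Int) + 1 - 1 + 2 - 1) / 2).toNat = (((m : Int) - 1 + 2 - 1) / 2).toNat + 1 := by omega
    have hv : (((m : Int) - 1 + 2 - 1) / 2).toNat = m / 2 := by omega
    simp only [if_pos (by omega : (1:Int) < (m:Int) + 1), if_pos (by omega : (1:Int) < (m:Int)),
      hc, hv, List.range_succ, List.map_append, if_pos h]
    simp; omega
  · have hc : (((m : Int) + 1 - 1 + 2 - 1) / 2).toNat = (((m : Int) - 1 + 2 - 1) / 2).toNat := by omega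
    simp only [if_pos (by omega : (1:Int) < (m:Int) + 1), if_pos (by omega : (1:Int) < (m:Int)),
      hc, if_neg h, List.append_nil]

theorem r24_succ (m : Nat) :
    PySem.List.pyRange 2 ((m : Int) + 1) 4
      = PySem.List.pyRange 2 (m : Int) 4 ++ (if m % 4 = 2 then [(m : Int)] else []) := by
  rw [PySem.List.pyRange_of_pos _ _ (by norm_num), PySem.List.pyRange_of_pos _ _ (by norm_num)]
  by_cases hm : m ≤ 2
  · interval_cases m <;> simp [List.range_succ]
  by_cases h : m % 4 = 2
  · have hc : (((m : Int) + 1 - 2 + 4 - 1) / 4).toNat = (((m : Int) - 2 + 4 - 1) / 4).toNat + 1 := by omega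
    have hv : (((m : Int) - 2 + 4 - 1) / 4).toNat = (m - 2) / 4 := by omega
    simp only [if_pos (by omega : (2:Int) < (m:Int) + 1), if_pos (by omega : (2:Int) < (m:Int)),
      hc, hv, List.range_succ, List.map_append, if_pos h]
    simp; omega
  · have hc : (((m : Int) + 1 - 2 + 4 - 1) / 4).toNat = (((m : Int) - 2 + 4 - 1) / 4).toNat := by omega
    simp only [if_pos (by omega : (2:Int) < (m:Int) + 1), if_pos (by omega : (2:Int) < (m:Int)),
      hc, if_neg h, List.append_nil]

-- the classifying filters of the full index range are exactly A's three stride ranges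
theorem filter0 (m : Nat) :
    (PySem.List.pyRange 0 (m : Int) 1).filter
        (fun i => PySem.Int.mod i 4 == 0)
      = PySem.List.pyRange 0 (m : Int) 4 := by
  induction m with
  | zero => simp [PySem.List.pyRange_one_eq_nil, PySem.List.pyRange_of_pos 0 0 (by norm_num : (0:Int) < 4)]
  | succ k ih =>
    rw [show ((k + 1 : Nat) : Int) = (k : Int) + 1 by push_cast; ring,
      PySem.List.pyRange_one_succ_right (by positivity), List.filter_append, ih, r04_succ]
    congr 1
    have hm4 : PySem.Int.mod (k : Int) 4 = (k : Int) % 4 :=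
      PySem.Int.mod_eq_emod_of_pos (by norm_num)
    have hm2 : PySem.Int.mod (k : Int) 2 = (k : Int) % 2 :=
      PySem.Int.mod_eq_emod_of_pos (by norm_num)
    simp only [List.filter_cons, List.filter_nil, hm4, hm2]
    by_cases h : k % 4 = 0
    · rw [if_pos h, if_pos (by simp; omega)]
    · rw [if_neg h, if_neg (by simp; omega)]

theorem filter1 (m : Nat) :
    (PySem.List.pyRange 0 (m : Int) 1).filter
        (fun i => !(PySem.Int.mod i 4 == 0) && (PySem.Int.mod i 2 == 1))
      = PySem.List.pyRange 1 (m : Int) 2 := by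
  induction m with
  | zero => simp [PySem.List.pyRange_one_eq_nil, PySem.List.pyRange_of_pos 1 0 (by norm_num : (0:Int) < 2)]
  | succ k ih =>
    rw [show ((k + 1 : Nat) : Int) = (k : Int) + 1 by push_cast; ring,
      PySem.List.pyRange_one_succ_right (by positivity), List.filter_append, ih, r12_succ]
    congr 1
    have hm4 : PySem.Int.mod (k : Int) 4 = (k : Int) % 4 :=
      PySem.Int.mod_eq_emod_of_pos (by norm_num)
    have hm2 : PySem.Int.mod (k : Int) 2 = (k : Int) % 2 :=
      PySem.Int.mod_eq_emod_of_pos (by norm_num)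
    simp only [List.filter_cons, List.filter_nil, hm4, hm2]
    by_cases h : k % 2 = 1
    · rw [if_pos h, if_pos (by simp; omega)]
    · rw [if_neg h, if_neg (by simp; omega)]

theorem filter2 (m : Nat) :
    (PySem.List.pyRange 0 (m : Int) 1).filter
        (fun i => !(PySem.Int.mod i 4 == 0) && !(PySem.Int.mod i 2 == 1))
      = PySem.List.pyRange 2 (m : Int) 4 := by
  induction m with
  | zero => simp [PySem.List.pyRange_one_eq_nil, PySem.List.pyRange_of_pos 2 0 (by norm_num : (0:Int) < 4)]
  | succ k ih =>
    rw [show ((k + 1 : Nat) : Int) = (k : Int) + 1 by push_cast; ring,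
      PySem.List.pyRange_one_succ_right (by positivity), List.filter_append, ih, r24_succ]
    congr 1
    have hm4 : PySem.Int.mod (k : Int) 4 = (k : Int) % 4 :=
      PySem.Int.mod_eq_emod_of_pos (by norm_num)
    have hm2 : PySem.Int.mod (k : Int) 2 = (k : Int) % 2 :=
      PySem.Int.mod_eq_emod_of_pos (by norm_num)
    simp only [List.filter_cons, List.filter_nil, hm4, hm2]
    by_cases h : k % 4 = 2
    · rw [if_pos h, if_pos (by simp; omega)]
    · rw [if_neg h, if_neg (by simp; omega)]

-- ===== VERDICT (by name: the statement is the Claim_ definition above) =====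
theorem plot_cipher_spec : Claim_equal_plot_cipher := by
  intro text _
  unfold Spec_plot_cipher plot_cipher plot_cipher_alt
  simp only [PySem.List.len_eq]
  rw [bfold]
  rw [PySem.List.foldl_append_singleton_eq_map, PySem.List.foldl_append_singleton_eq_map,
    PySem.List.foldl_append_singleton_eq_map]
  rw [filter0, filter1, filter2]
  simp
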